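-- pv_equiv track=rewrite | github.com/jz/jinchaoapp | katago_gtp.py | _parse_showboard
-- ===== SOURCE A (Python) =====
-- def _parse_showboard(text: str) -> dict:
--     """
--     Parse KataGo showboard ASCII output to extract stone positions.
--     Board lines look like:
--       9 . . . . . . . . .
--       5 . . . . X1. . . .
--       3 . . O2. . . . . .
--     Column header looks like:
--          A B C D E F G H J
--     """
--     GTP_COLS = set("ABCDEFGHJKLMNOPQRST")
--     lines = text.strip().split("\n")
--
--     # Find header line (contains column letters, only spaces + column letters)
--     header_line = None
--     header_idx = None
--     for i, line in enumerate(lines):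
--         stripped = line.strip()
--         if stripped and all(c in GTP_COLS or c == " " for c in stripped):
--             if "A" in stripped and "B" in stripped:
--                 header_line = line
--                 header_idx = i
--                 break
--
--     if header_line is None:
--         return {"black": [], "white": []}
--
--     # Map column letter -> exact character index in the line
--     col_positions = {ch: idx for idx, ch in enumerate(header_line) if ch in GTP_COLS}
--
--     black_stones, white_stones = [], []
--     for line in lines[header_idx + 1:]:
--         stripped = line.strip()
--         if not stripped:
--             break
--         parts = stripped.split()
--         if not parts or not parts[0].isdigit():
--             break
--         row_num = int(parts[0])
--         for col_letter, col_pos in col_positions.items():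
--             if col_pos < len(line):
--                 ch = line[col_pos]
--                 if ch == "X":
--                     black_stones.append(f"{col_letter}{row_num}")
--                 elif ch == "O":
--                     white_stones.append(f"{col_letter}{row_num}")
--
--     return {"black": black_stones, "white": white_stones}
-- ===== SOURCE B (Python) =====
-- def _parse_showboard(text: str) -> dict:
--     """Parse KataGo showboard ASCII output into stone positions.
--
--     Single-pass state machine: walk the lines once; before the header is
--     seen, test each line for header shape; after it, pair the header line
--     with each data line positionally via zip (no column dict at all) and
--     read stones where the header character is a column letter.
--     """
--     GTP_COLS = set("ABCDEFGHJKLMNOPQRST")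
--     black, white = [], []
--     header = None
--     for line in text.strip().split("\n"):
--         stripped = line.strip()
--         if header is None:
--             if stripped and all(c in GTP_COLS or c == " " for c in stripped) \
--                     and "A" in stripped and "B" in stripped:
--                 header = line
--         else:
--             parts = stripped.split()
--             if not stripped or not parts or not parts[0].isdigit():
--                 break
--             row = int(parts[0])
--             for hch, ch in zip(header, line):
--                 if hch in GTP_COLS:
--                     if ch == "X":
--                         black.append(f"{hch}{row}")
--                     elif ch == "O":
--                         white.append(f"{hch}{row}")
--     if header is None:
--         return {"black": [], "white": []}
--     return {"black": black, "white": white}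
-- ===== Notes on version B (the rewrite author's own statement) =====
-- stated objective: alternative
-- what changed: B is a single-pass state machine over the lines with no column dict at all: once the header line is seen, each data line is paired with the header positionally via zip and stones are read where the paired header character is a column letter, instead of A's two-stage find-header / build letter-to-position dict / index into each line per letter.
import Mathlib
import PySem

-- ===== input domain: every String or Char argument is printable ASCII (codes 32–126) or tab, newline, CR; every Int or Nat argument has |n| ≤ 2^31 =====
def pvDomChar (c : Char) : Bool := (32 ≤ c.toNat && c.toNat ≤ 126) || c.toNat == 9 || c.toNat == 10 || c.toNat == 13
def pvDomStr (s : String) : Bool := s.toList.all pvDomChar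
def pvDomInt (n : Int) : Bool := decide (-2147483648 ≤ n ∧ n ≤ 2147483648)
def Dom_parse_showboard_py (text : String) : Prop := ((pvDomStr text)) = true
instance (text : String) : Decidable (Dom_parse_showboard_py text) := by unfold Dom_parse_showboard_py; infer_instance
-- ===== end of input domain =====

-- B replaces A's staged find-header / letter→position dict / per-letter indexing by a
-- single-pass state machine that zips the header line positionally with each data line
-- (objective: alternative decomposition, no dict, same asymptotic cost).

-- ===== shared helpers (code that is literally identical in the two Pythons) =====
-- GTP_COLS = set("ABCDEFGHJKLMNOPQRST")
def pvGtpCols : PySem.Set Char := PySem.Set.ofList "ABCDEFGHJKLMNOPQRST".toList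

def pvIsCol (c : Char) : Bool := PySem.Set.contains pvGtpCols c

-- the header test: stripped nonempty, only column letters and spaces, contains "A" and "B"
def pvIsHeader (line : String) : Bool :=
  let stripped := PySem.Str.strip line
  !(stripped == "") && stripped.toList.all (fun c => pvIsCol c || c == ' ')
    && PySem.Str.isIn "A" stripped && PySem.Str.isIn "B" stripped

-- per data line (identical break/digit checks in A and B); none = the loop breaks.
-- ofStr? is guarded by strIsdigit, so the .getD 0 default is never taken (int(s) succeeds).
def pvRowOf? (line : String) : Option Int :=
  let stripped := PySem.Str.strip line
  if stripped == "" then none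
  else
    match PySem.Str.split₀ stripped with
    | [] => none
    | p :: _ => if PySem.Str.strIsdigit p then some ((PySem.Int.ofStr? p).getD 0) else none

-- f"{col_letter}{row_num}"
def pvStone (ch : Char) (r : Int) : String := String.ofList [ch] ++ PySem.Int.toStr r

-- ===== PORT A =====
-- A's header-search loop: first header line, and the lines after it
def pvFindHeader : List String → Option (String × List String)
  | [] => none
  | l :: rest => if pvIsHeader l then some (l, rest) else pvFindHeader rest

-- col_positions = {ch: idx for idx, ch in enumerate(header_line) if ch in GTP_COLS}
def pvColDict (hd : List Char) : PySem.Dict Char Int :=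
  (PySem.List.enumerate hd).foldl
    (fun d p => if pvIsCol p.2 then d.insert p.2 p.1 else d) PySem.Dict.empty

-- body of A's inner loop over col_positions.items()
def pvStepA (line : String) (r : Int) (bw : List String × List String) (q : Char × Int) :
    List String × List String :=
  if q.2 < PySem.Str.len line then
    match PySem.Str.pyGet? line q.2 with
    | some c =>
        if c == 'X' then (bw.1 ++ [pvStone q.1 r], bw.2)
        else if c == 'O' then (bw.1, bw.2 ++ [pvStone q.1 r])
        else bw
    | none => bw
  else bw

-- A's loop over the lines after the header
def pvScanA (d : PySem.Dict Char Int) : List String → List String → List String →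
    List String × List String
  | [], b, w => (b, w)
  | line :: rest, b, w =>
    match pvRowOf? line with
    | none => (b, w)
    | some r =>
        let bw := d.items.foldl (pvStepA line r) (b, w)
        pvScanA d rest bw.1 bw.2

def parse_showboard_py (text : String) : List (String × List String) :=
  let lines := (PySem.Str.split? (PySem.Str.strip text) "\n").getD []
  match pvFindHeader lines with
  | none => [("black", []), ("white", [])]
  | some (headerLine, rest) =>
      let bw := pvScanA (pvColDict headerLine.toList) rest [] []
      [("black", bw.1), ("white", bw.2)]

-- ===== PORT B =====
-- body of B's inner loop: for hch, ch in zip(header, line): if hch in GTP_COLS: …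
def pvStepB (r : Int) (bw : List String × List String) (q : Char × Char) :
    List String × List String :=
  if pvIsCol q.1 then
    if q.2 == 'X' then (bw.1 ++ [pvStone q.1 r], bw.2)
    else if q.2 == 'O' then (bw.1, bw.2 ++ [pvStone q.1 r])
    else bw
  else bw

-- B's single pass over all lines; the Option String state is the `header` variable
def pvMachineB : List String → Option String → List String → List String →
    Option String × (List String × List String)
  | [], h, b, w => (h, (b, w))
  | line :: rest, none, b, w =>
      if pvIsHeader line then pvMachineB rest (some line) b w
      else pvMachineB rest none b w
  | line :: rest, some hd, b, w =>
      match pvRowOf? line with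
      | none => (some hd, (b, w))
      | some r =>
          let bw := (hd.toList.zip line.toList).foldl (pvStepB r) (b, w)
          pvMachineB rest (some hd) bw.1 bw.2

def parse_showboard_py_alt (text : String) : List (String × List String) :=
  let lines := (PySem.Str.split? (PySem.Str.strip text) "\n").getD []
  let res := pvMachineB lines none [] []
  match res.1 with
  | none => [("black", []), ("white", [])]
  | some _ => [("black", res.2.1), ("white", res.2.2)]

-- ===== PRECONDITION & SPEC =====
-- Pre_ excludes texts in which a header-shaped line repeats a GTP column letter: A's
-- letter-keyed dict then keeps only the last column position of the repeated letter and
-- iterates letters in first-occurrence order — an accidental artefact of dict overwriting —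
-- while B reports every occurrence position in left-to-right order.
def Pre_parse_showboard_py (text : String) : Prop :=
  ∀ line ∈ (PySem.Str.split? (PySem.Str.strip text) "\n").getD [],
    pvIsHeader line = true → (line.toList.filter pvIsCol).Nodup
instance (text : String) : Decidable (Pre_parse_showboard_py text) := by
  unfold Pre_parse_showboard_py; infer_instance

def pvWitness_parse_showboard_py : String := "   A B C\n3 . X .\n2 O . X\n1 . . ."

def Spec_parse_showboard_py (text : String) (out : List (String × List String)) : Prop :=
  out = parse_showboard_py_alt text
instance (text : String) (out : List (String × List String)) :
    Decidable (Spec_parse_showboard_py text out) := by unfold Spec_parse_showboard_py; infer_instance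

-- ===== CLAIM (what is proved, stated in full; the proofs are below) =====
def Claim_equal_parse_showboard_py : Prop :=
  ∀ (text : String), Dom_parse_showboard_py text → Pre_parse_showboard_py text →
    Spec_parse_showboard_py text (parse_showboard_py text)

-- ===== LEMMAS AND PROOFS =====

-- the filtered enumeration of the header that A's dict is built from
def pvEntries (hd : List Char) : List (Int × Char) :=
  (PySem.List.enumerate hd).filter (fun p => pvIsCol p.2)

theorem pvFindHeader_sound (ls : List String) (hl : String) (rest : List String)
    (h : pvFindHeader ls = some (hl, rest)) : hl ∈ ls ∧ pvIsHeader hl = true := by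
  induction ls with
  | nil => simp [pvFindHeader] at h
  | cons l ls ih =>
    by_cases hh : pvIsHeader l
    · simp [pvFindHeader, hh] at h
      exact ⟨by simp [h.1], h.1 ▸ hh⟩
    · simp [pvFindHeader, hh] at h
      rcases ih h with ⟨h1, h2⟩
      exact ⟨List.mem_cons_of_mem _ h1, h2⟩

theorem pvEntries_snd (hd : List Char) :
    ((pvEntries hd).map (·.2)) = hd.filter pvIsCol := by
  unfold pvEntries
  have h1 : (PySem.List.enumerate hd).filter (fun p => pvIsCol p.2)
      = (PySem.List.enumerate hd).filter (pvIsCol ∘ (·.2)) := rfl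
  rw [h1, ← List.filter_map, PySem.List.map_snd_enumerate]

theorem pvColDict_items (hd : List Char) (hnd : (hd.filter pvIsCol).Nodup) :
    (pvColDict hd).items = (pvEntries hd).map (fun p => (p.2, p.1)) := by
  unfold pvColDict
  have h0 := PySem.List.foldl_if_eq_foldl_filter (fun p : Int × Char => pvIsCol p.2)
    (fun (d : PySem.Dict Char Int) p => d.insert p.2 p.1) (PySem.List.enumerate hd)
    PySem.Dict.empty
  rw [h0]
  have hk : ((pvEntries hd).map (fun p => p.2)).Nodup := by
    rw [show ((pvEntries hd).map (fun p => p.2)) = ((pvEntries hd).map (·.2)) from rfl,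
      pvEntries_snd]
    exact hnd
  have h := PySem.Dict.items_foldl_insert_fresh (pvEntries hd) (fun p => p.2) (fun p => p.1)
      PySem.Dict.empty (fun a _ => PySem.Dict.contains_empty a.2) hk
  simpa [pvEntries] using h

theorem pvPyGet?_cons_pos (c : Char) (cs : List Char) (k : Int) (hk : 1 ≤ k) :
    PySem.List.pyGet? (c :: cs) k = PySem.List.pyGet? cs (k - 1) := by
  simp only [PySem.List.pyGet?, PySem.List.pyIdx?, List.length_cons]
  have h0 : (0 : Int) ≤ k := by omega
  have h0' : (0 : Int) ≤ k - 1 := by omega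
  rw [if_pos h0, if_pos h0']
  by_cases hlt : k < (cs.length : Int) + 1
  · have hlt' : k - 1 < (cs.length : Int) := by omega
    rw [if_pos (by push_cast; omega), if_pos hlt']
    have hk1 : k.toNat = (k - 1).toNat + 1 := by omega
    rw [Option.bind_some, Option.bind_some, hk1, List.getElem?_cons_succ]
  · rw [if_neg (by push_cast; omega), if_neg (by omega)]
    rfl

-- the A-side filterMap shifts by one when the line loses its head character
theorem pvShiftRHS {β : Type} (h : Char → Char → Option β) (c : Char) (cs : List Char)
    (s : Int) (E : List (Int × Char)) (hE : ∀ p ∈ E, s + 1 ≤ p.1) :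
    (E.filterMap (fun p =>
        if p.1 < s + ((c :: cs).length : Int) then
          (PySem.List.pyGet? (c :: cs) (p.1 - s)).bind (fun ch => h p.2 ch)
        else none))
    = E.filterMap (fun p =>
        if p.1 < (s + 1) + (cs.length : Int) then
          (PySem.List.pyGet? cs (p.1 - (s + 1))).bind (fun ch => h p.2 ch)
        else none) := by
  apply List.filterMap_congr
  intro p hp
  have h1 := hE p hp
  have hc : (p.1 < s + ((c :: cs).length : Int)) ↔ (p.1 < (s + 1) + (cs.length : Int)) := by
    simp only [List.length_cons]; push_cast; omega
  by_cases hlt : p.1 < (s + 1) + (cs.length : Int)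
  · rw [if_pos (hc.2 hlt), if_pos hlt,
      pvPyGet?_cons_pos c cs (p.1 - s) (by omega),
      show p.1 - s - 1 = p.1 - (s + 1) by omega]
  · rw [if_neg (fun hx => hlt (hc.1 hx)), if_neg hlt]

theorem pvEntriesFrom_ge (cs : List Char) (s : Int) :
    ∀ p ∈ (PySem.List.enumerate cs s).filter (fun p => pvIsCol p.2), s ≤ p.1 := by
  intro p hp
  have hp' := List.mem_of_mem_filter hp
  rcases (PySem.List.mem_enumerate_iff cs s p).1 hp' with ⟨k, hk, rfl⟩
  simp

-- core: B's zip scan of the line = A's per-entry indexing into the line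
theorem pvZipCore {β : Type} (g : Char → Char → Option β) :
    ∀ (hd L : List Char) (s : Int),
      (hd.zip L).filterMap (fun q => if pvIsCol q.1 then g q.1 q.2 else none)
      = ((PySem.List.enumerate hd s).filter (fun p => pvIsCol p.2)).filterMap
          (fun p => if p.1 < s + (L.length : Int) then
              (PySem.List.pyGet? L (p.1 - s)).bind (fun ch => g p.2 ch)
            else none) := by
  intro hd
  induction hd with
  | nil => intro L s; simp [PySem.List.enumerate_nil]
  | cons c cs ih =>
    intro L s
    cases L with
    | nil =>
      rw [List.zip_nil_right, List.filterMap_nil]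
      symm
      rw [List.filterMap_eq_nil_iff]
      intro p hp
      rw [if_neg]
      have := pvEntriesFrom_ge (c :: cs) s p hp
      simp only [List.length_nil, Nat.cast_zero, add_zero]
      omega
    | cons d ds =>
      rw [List.zip_cons_cons, List.filterMap_cons, PySem.List.enumerate_cons]
      by_cases hc : pvIsCol c
      · rw [List.filter_cons_of_pos (by simpa using hc), List.filterMap_cons]
        rw [if_pos hc, if_pos (show (s : Int) < s + ((d :: ds).length : Int) by
          simp only [List.length_cons]; push_cast; omega)]
        rw [show (s : Int) - s = 0 by omega,
          show PySem.List.pyGet? (d :: ds) 0 = some d by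
            simp [PySem.List.pyGet?, PySem.List.pyIdx?]]
        simp only [Option.bind_some]
        rw [pvShiftRHS g d ds s _ (by
            intro p hp; have := pvEntriesFrom_ge cs (s + 1) p hp; omega),
          ih ds (s + 1)]
      · rw [List.filter_cons_of_neg (by simpa using hc), if_neg hc]
        rw [pvShiftRHS g d ds s _ (by
            intro p hp; have := pvEntriesFrom_ge cs (s + 1) p hp; omega),
          ih ds (s + 1)]

theorem pvStepA_decomp (line : String) (r : Int) :
    ∀ (qs : List (Char × Int)) (b w : List String),
      qs.foldl (pvStepA line r) (b, w)
      = (b ++ qs.filterMap (fun q =>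
            if q.2 < PySem.Str.len line then
              (PySem.Str.pyGet? line q.2).bind
                (fun c => if c == 'X' then some (pvStone q.1 r) else none)
            else none),
         w ++ qs.filterMap (fun q =>
            if q.2 < PySem.Str.len line then
              (PySem.Str.pyGet? line q.2).bind
                (fun c => if c == 'O' then some (pvStone q.1 r) else none)
            else none)) := by
  intro qs
  induction qs with
  | nil => intro b w; simp
  | cons q qs ih =>
    intro b w
    rw [List.foldl_cons, List.filterMap_cons, List.filterMap_cons]
    simp only [pvStepA]
    by_cases h1 : q.2 < PySem.Str.len line
    · rw [if_pos h1, if_pos h1, if_pos h1]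
      cases hg : PySem.Str.pyGet? line q.2 with
      | none =>
        exact ih b w
      | some c =>
        simp only [Option.bind_some]
        by_cases hx : c = 'X'
        · subst hx
          have hd : (('X' : Char) == 'X') = true := by decide
          rw [if_pos hd, if_pos hd,
            if_neg (show ¬ (('X' : Char) == 'O') = true by decide)]
          rw [ih (b ++ [pvStone q.1 r]) w]
          simp
        · by_cases ho : c = 'O'
          · subst ho
            have hd1 : ¬ (('O' : Char) == 'X') = true := by decide
            have hd2 : (('O' : Char) == 'O') = true := by decide
            rw [if_neg hd1, if_neg hd1, if_pos hd2, if_pos hd2]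
            rw [ih b (w ++ [pvStone q.1 r])]
            simp
          · have hd1 : ¬ (c == 'X') = true := by simp [hx]
            have hd2 : ¬ (c == 'O') = true := by simp [ho]
            rw [if_neg hd1, if_neg hd1, if_neg hd2, if_neg hd2]
            exact ih b w
    · rw [if_neg h1, if_neg h1, if_neg h1]
      exact ih b w

theorem pvStepB_decomp (r : Int) :
    ∀ (qs : List (Char × Char)) (b w : List String),
      qs.foldl (pvStepB r) (b, w)
      = (b ++ qs.filterMap (fun q =>
            if pvIsCol q.1 then
              (if q.2 == 'X' then some (pvStone q.1 r) else none)
            else none),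
         w ++ qs.filterMap (fun q =>
            if pvIsCol q.1 then
              (if q.2 == 'O' then some (pvStone q.1 r) else none)
            else none)) := by
  intro qs
  induction qs with
  | nil => intro b w; simp
  | cons q qs ih =>
    intro b w
    rw [List.foldl_cons, List.filterMap_cons, List.filterMap_cons]
    simp only [pvStepB]
    by_cases hc : pvIsCol q.1
    · rw [if_pos hc, if_pos hc, if_pos hc]
      by_cases hx : q.2 = 'X'
      · have hd : (q.2 == 'X') = true := by simp [hx]
        rw [if_pos hd, if_pos hd, if_neg (show ¬ (q.2 == 'O') = true by simp [hx])]
        rw [ih (b ++ [pvStone q.1 r]) w]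
        simp
      · by_cases ho : q.2 = 'O'
        · have hd1 : ¬ (q.2 == 'X') = true := by simp [hx]
          have hd2 : (q.2 == 'O') = true := by simp [ho]
          rw [if_neg hd1, if_neg hd1, if_pos hd2, if_pos hd2]
          rw [ih b (w ++ [pvStone q.1 r])]
          simp
        · have hd1 : ¬ (q.2 == 'X') = true := by simp [hx]
          have hd2 : ¬ (q.2 == 'O') = true := by simp [ho]
          rw [if_neg hd1, if_neg hd1, if_neg hd2, if_neg hd2]
          exact ih b w
    · rw [if_neg hc, if_neg hc, if_neg hc]
      exact ih b w

-- one data line produces the same two stone lists on both sides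
theorem pvInner_eq (hd : List Char) (hnd : (hd.filter pvIsCol).Nodup)
    (line : String) (r : Int) (b w : List String) :
    (pvColDict hd).items.foldl (pvStepA line r) (b, w)
    = (hd.zip line.toList).foldl (pvStepB r) (b, w) := by
  rw [pvColDict_items hd hnd, pvStepA_decomp, pvStepB_decomp]
  have key : ∀ (g : Char → Char → Option String),
      ((pvEntries hd).map (fun p => (p.2, p.1))).filterMap (fun q =>
          if q.2 < PySem.Str.len line then
            (PySem.Str.pyGet? line q.2).bind (fun c => g q.1 c)
          else none)
      = (hd.zip line.toList).filterMap (fun q => if pvIsCol q.1 then g q.1 q.2 else none) := by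
    intro g
    rw [List.filterMap_map, pvZipCore g hd line.toList 0]
    unfold pvEntries
    apply List.filterMap_congr
    intro p _
    simp only [Function.comp, PySem.Str.pyGet?_eq, PySem.Str.len_eq, zero_add, sub_zero]
    rfl
  rw [key (fun ch c => if c == 'X' then some (pvStone ch r) else none),
    key (fun ch c => if c == 'O' then some (pvStone ch r) else none)]

-- B's machine in the found-header state = A's scan loop
theorem pvMachine_scan (hd : String) (hnd : (hd.toList.filter pvIsCol).Nodup) :
    ∀ (rest : List String) (b w : List String),
      pvMachineB rest (some hd) b w = (some hd, pvScanA (pvColDict hd.toList) rest b w) := by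
  intro rest
  induction rest with
  | nil => intro b w; rfl
  | cons line rest ih =>
    intro b w
    rw [pvMachineB, pvScanA]
    cases pvRowOf? line with
    | none => rfl
    | some r =>
      simp only
      rw [← pvInner_eq hd.toList hnd line r b w, ih]

-- B's machine before the header follows A's header search
theorem pvMachine_none (ls : List String) (b w : List String)
    (h : pvFindHeader ls = none) : pvMachineB ls none b w = (none, (b, w)) := by
  induction ls with
  | nil => rfl
  | cons l ls ih =>
    by_cases hh : pvIsHeader l
    · simp [pvFindHeader, hh] at h
    · rw [pvMachineB, if_neg (by simpa using hh)]
      rw [pvFindHeader, if_neg (by simpa using hh)] at h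
      exact ih h

theorem pvMachine_found (ls : List String) (hl : String) (rest : List String)
    (b w : List String) (h : pvFindHeader ls = some (hl, rest)) :
    pvMachineB ls none b w = pvMachineB rest (some hl) b w := by
  induction ls with
  | nil => simp [pvFindHeader] at h
  | cons l ls ih =>
    by_cases hh : pvIsHeader l
    · rw [pvFindHeader, if_pos (by simpa using hh)] at h
      have h2 : l = hl ∧ ls = rest :=
        ⟨congrArg Prod.fst (Option.some.inj h), congrArg Prod.snd (Option.some.inj h)⟩
      rw [pvMachineB, if_pos (by simpa using hh), h2.1, h2.2]
    · rw [pvMachineB, if_neg (by simpa using hh)]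
      rw [pvFindHeader, if_neg (by simpa using hh)] at h
      exact ih h

-- ===== VERDICT (by name: the statement is the Claim_ definition above) =====
theorem parse_showboard_py_spec : Claim_equal_parse_showboard_py := by
  unfold Claim_equal_parse_showboard_py
  intro text _ hpre
  unfold Spec_parse_showboard_py
  show parse_showboard_py text = parse_showboard_py_alt text
  rw [parse_showboard_py, parse_showboard_py_alt]
  cases hfh : pvFindHeader ((PySem.Str.split? (PySem.Str.strip text) "\n").getD []) with
  | none =>
    simp only
    rw [pvMachine_none _ [] [] hfh]
  | some p =>
    obtain ⟨hl, rest⟩ := p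
    simp only
    rcases pvFindHeader_sound _ hl rest hfh with ⟨hmem, hhdr⟩
    have hnd : (hl.toList.filter pvIsCol).Nodup := hpre hl hmem hhdr
    rw [pvMachine_found _ hl rest [] [] hfh, pvMachine_scan hl hnd rest [] []]
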